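-- pv_equiv track=rewrite | github.com/OrganizeMe-LuzIA/LuzIA | backend/scripts/seed_dashboard_reports_demo.py | _resultado_global
-- ===== SOURCE A (Python) =====
-- from typing import Any, Dict, List, Optional
--
-- def _resultado_global(dimensoes: List[Dict[str, Any]]) -> str:
--     riscos = sum(1 for item in dimensoes if item["classificacao"] == "risco")
--     favoraveis = sum(1 for item in dimensoes if item["classificacao"] == "favoravel")
--     if riscos >= 3:
--         return "risco"
--     if favoraveis >= 3:
--         return "favoravel"
--     return "intermediario"
-- ===== SOURCE B (Python) =====
-- from typing import Any, Dict, List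
--
-- def _resultado_global(dimensoes: List[Dict[str, Any]]) -> str:
--     riscos = 0
--     favoraveis = 0
--     for item in dimensoes:
--         c = item["classificacao"]
--         if c == "risco":
--             riscos += 1
--             if riscos == 3:
--                 return "risco"
--         elif c == "favoravel":
--             favoraveis += 1
--     return "favoravel" if favoraveis >= 3 else "intermediario"
-- ===== Notes on version B (the rewrite author's own statement) =====
-- stated objective: alternative
-- what changed: Replaces A's two full generator scans plus priority cascade with one short-circuit loop keeping both counters, returning 'risco' the moment the third risco item is seen (correct because counts only grow, so riscos>=3 is decided as soon as it first holds).
import Mathlib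
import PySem

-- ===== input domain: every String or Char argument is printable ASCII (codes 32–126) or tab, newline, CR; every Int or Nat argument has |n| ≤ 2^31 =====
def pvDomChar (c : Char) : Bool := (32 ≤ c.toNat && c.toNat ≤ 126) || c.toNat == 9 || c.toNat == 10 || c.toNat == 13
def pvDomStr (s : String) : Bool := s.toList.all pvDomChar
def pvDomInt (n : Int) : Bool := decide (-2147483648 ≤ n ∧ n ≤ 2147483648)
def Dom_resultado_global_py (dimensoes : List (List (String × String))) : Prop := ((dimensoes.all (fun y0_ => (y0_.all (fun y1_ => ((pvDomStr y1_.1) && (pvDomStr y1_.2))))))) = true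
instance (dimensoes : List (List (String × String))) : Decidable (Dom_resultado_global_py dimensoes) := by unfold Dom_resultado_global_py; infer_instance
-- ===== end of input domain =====

-- B replaces A's two full scans plus cascade with one short-circuit pass carrying both
-- counters and returning "risco" as soon as the third risco item is seen (alternative).

-- ===== PORT A =====
-- item["classificacao"] is ported as getD "classificacao" ""; exact on Pre_ (key present, so no KeyError).
def resultado_global_py (dimensoes : List (List (String × String))) : String :=
  let riscos : Int := dimensoes.foldl
    (fun acc item => if (PySem.Dict.ofList item).getD "classificacao" "" == "risco" then acc + 1 else acc) 0
  let favoraveis : Int := dimensoes.foldl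
    (fun acc item => if (PySem.Dict.ofList item).getD "classificacao" "" == "favoravel" then acc + 1 else acc) 0
  if riscos ≥ 3 then "risco"
  else if favoraveis ≥ 3 then "favoravel"
  else "intermediario"

-- ===== PORT B =====
-- the loop of Source B: one pass, two accumulators, early return on the third "risco"
def resultado_global_py_alt_go (l : List (List (String × String))) (riscos favoraveis : Int) : String :=
  match l with
  | [] => if favoraveis ≥ 3 then "favoravel" else "intermediario"
  | item :: rest =>
    let c := (PySem.Dict.ofList item).getD "classificacao" ""
    if c == "risco" then
      if riscos + 1 == 3 then "risco"
      else resultado_global_py_alt_go rest (riscos + 1) favoraveis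
    else if c == "favoravel" then resultado_global_py_alt_go rest riscos (favoraveis + 1)
    else resultado_global_py_alt_go rest riscos favoraveis

def resultado_global_py_alt (dimensoes : List (List (String × String))) : String :=
  resultado_global_py_alt_go dimensoes 0 0

-- ===== PRECONDITION & SPEC =====
-- Pre_ excludes dimensions missing the "classificacao" key, on which Python A raises KeyError.
def Pre_resultado_global_py (dimensoes : List (List (String × String))) : Prop :=
  (dimensoes.all (fun item => item.any (fun p => p.1 == "classificacao"))) = true
instance (dimensoes : List (List (String × String))) : Decidable (Pre_resultado_global_py dimensoes) := by unfold Pre_resultado_global_py; infer_instance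
def pvWitness_resultado_global_py : (List (List (String × String))) :=
  [[("classificacao", "risco")], [("classificacao", "favoravel")]]
def Spec_resultado_global_py (dimensoes : List (List (String × String))) (out : String) : Prop := out = resultado_global_py_alt dimensoes
instance (dimensoes : List (List (String × String))) (out : String) : Decidable (Spec_resultado_global_py dimensoes out) := by unfold Spec_resultado_global_py; infer_instance

-- ===== CLAIM (what is proved, stated in full; the proofs are below) =====
def Claim_equal_resultado_global_py : Prop := ∀ (dimensoes : List (List (String × String))), Dom_resultado_global_py dimensoes → Pre_resultado_global_py dimensoes → Spec_resultado_global_py dimensoes (resultado_global_py dimensoes)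

-- ===== LEMMAS AND PROOFS =====

-- B's loop, with riscos ≤ 2 so far, decides exactly A's cascade over the remaining counts.
theorem alt_go_spec (l : List (List (String × String))) :
    ∀ (ris fav : Int), ris ≤ 2 →
    resultado_global_py_alt_go l ris fav =
      (if ris + (l.countP (fun item => (PySem.Dict.ofList item).getD "classificacao" "" == "risco") : Int) ≥ 3 then "risco"
       else if fav + (l.countP (fun item => (PySem.Dict.ofList item).getD "classificacao" "" == "favoravel") : Int) ≥ 3 then "favoravel"
       else "intermediario") := by
  induction l with
  | nil =>
    intro ris fav h
    simp only [resultado_global_py_alt_go, List.countP_nil, Nat.cast_zero, add_zero, ge_iff_le]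
    split_ifs <;> first | rfl | omega
  | cons item rest ih =>
    intro ris fav h
    by_cases hr : (PySem.Dict.ofList item).getD "classificacao" "" == "risco"
    · have hf : ¬ ((PySem.Dict.ofList item).getD "classificacao" "" == "favoravel") = true := by
        simp at hr ⊢; simp [hr]
      by_cases h3 : ris + 1 = 3
      · have hb : ((ris + 1 : Int) == 3) = true := by simp [h3]
        simp only [resultado_global_py_alt_go, hr, hb, hf, if_true, if_false,
          Bool.false_eq_true, List.countP_cons, ge_iff_le]
        push_cast
        split_ifs <;> first | rfl | omega
      · have hb : ((ris + 1 : Int) == 3) = false := by simp [h3]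
        simp only [resultado_global_py_alt_go, hr, hb, hf, if_true, if_false,
          Bool.false_eq_true, ih (ris + 1) fav (by omega), List.countP_cons, ge_iff_le]
        push_cast
        split_ifs <;> first | rfl | omega
    · by_cases hf : (PySem.Dict.ofList item).getD "classificacao" "" == "favoravel"
      · simp only [resultado_global_py_alt_go, hr, hf, if_true, if_false,
          Bool.false_eq_true, ih ris (fav + 1) h, List.countP_cons, ge_iff_le]
        push_cast
        split_ifs <;> first | rfl | omega
      · simp only [resultado_global_py_alt_go, hr, hf, if_false,
          Bool.false_eq_true, ih ris fav h, List.countP_cons, ge_iff_le]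
        push_cast
        split_ifs <;> first | rfl | omega

-- ===== VERDICT (by name: the statement is the Claim_ definition above) =====
theorem resultado_global_py_spec : Claim_equal_resultado_global_py := by
  intro dimensoes _ _
  show _ = _
  unfold resultado_global_py resultado_global_py_alt
  rw [alt_go_spec dimensoes 0 0 (by omega)]
  simp only [PySem.List.foldl_if_add_one, zero_add]
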